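-- pv_equiv track=rewrite | github.com/MolfarUA/CodeWars_Solutions | 6 kyu/Survivors Ep.4/solution.py | survives
-- ===== SOURCE A (Python) =====
-- def survives(momentum, powerups):
--     pos = -1
--     while momentum > 0 and pos < len(powerups):
--         momentum = momentum - 1
--         pos = pos + 1
--         if pos < len(powerups):
--             momentum = momentum + powerups[pos]
--     return pos == len(powerups)
-- ===== SOURCE B (Python) =====
-- def survives(momentum, powerups):
--     prefix = [0]
--     s = 0
--     for p in powerups:
--         s += p
--         prefix.append(s)
--     return all(momentum - k + prefix[k] > 0 for k in range(len(powerups) + 1))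
-- ===== Notes on version B (the rewrite author's own statement) =====
-- stated objective: alternative
-- what changed: Replaces the step-by-step momentum simulation with a prefix-sum table and a single all(...) predicate over the len+1 checkpoints momentum - k + prefix[k] > 0.
import Mathlib
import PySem

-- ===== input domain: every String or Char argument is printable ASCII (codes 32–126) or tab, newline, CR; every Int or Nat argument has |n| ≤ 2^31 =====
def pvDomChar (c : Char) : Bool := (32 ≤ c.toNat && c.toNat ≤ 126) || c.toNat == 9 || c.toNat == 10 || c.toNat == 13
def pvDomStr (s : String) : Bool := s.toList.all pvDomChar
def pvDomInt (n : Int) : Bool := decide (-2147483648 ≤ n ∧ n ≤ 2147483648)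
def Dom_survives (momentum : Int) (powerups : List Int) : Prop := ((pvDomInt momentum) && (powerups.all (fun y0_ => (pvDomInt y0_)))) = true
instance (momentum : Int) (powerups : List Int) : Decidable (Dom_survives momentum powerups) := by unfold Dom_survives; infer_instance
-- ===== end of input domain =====

-- B replaces A's step-by-step momentum simulation by a prefix-sum table plus an
-- all-checkpoints predicate (alternative decomposition; same O(n) cost).

-- ===== PORT A =====
-- A's while loop, state (momentum, pos); returns the final pos
def survivesGo (momentum pos : Int) (powerups : List Int) : Int :=
  if momentum > 0 ∧ pos < (powerups.length : Int) then
    let m1 := momentum - 1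
    let p1 := pos + 1
    let m2 := if p1 < (powerups.length : Int)
              then m1 + (PySem.List.pyGet? powerups p1).getD 0  -- index is in range whenever this branch is reached
              else m1
    survivesGo m2 p1 powerups
  else pos
termination_by ((powerups.length : Int) + 1 - pos).toNat
decreasing_by omega

def survives (momentum : Int) (powerups : List Int) : Bool :=
  decide (survivesGo momentum (-1) powerups = (powerups.length : Int))

-- ===== PORT B =====
def survives_alt (momentum : Int) (powerups : List Int) : Bool :=
  let st := powerups.foldl (fun (acc : List Int × Int) p => (acc.1 ++ [acc.2 + p], acc.2 + p)) ([0], 0)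
  (List.range (powerups.length + 1)).all
    (fun k => decide (momentum - (k : Int) + st.1.getD k 0 > 0))

-- ===== PRECONDITION & SPEC =====
def Spec_survives (momentum : Int) (powerups : List Int) (out : Bool) : Prop := out = survives_alt momentum powerups
instance (momentum : Int) (powerups : List Int) (out : Bool) : Decidable (Spec_survives momentum powerups out) := by unfold Spec_survives; infer_instance

-- ===== CLAIM (what is proved, stated in full; the proofs are below) =====
def Claim_equal_survives : Prop := ∀ (momentum : Int) (powerups : List Int), Dom_survives momentum powerups → Spec_survives momentum powerups (survives momentum powerups)

-- ===== LEMMAS AND PROOFS =====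

-- common functional characterisation of both programs
def gSurv : Int → List Int → Bool
  | m, [] => decide (m > 0)
  | m, p :: r => decide (m > 0) && gSurv (m - 1 + p) r

-- prefix-sum list: scl s [p1,…,pn] = [s, s+p1, …, s+⋯+pn]
def scl (s : Int) : List Int → List Int
  | [] => [s]
  | p :: r => s :: scl (s + p) r

lemma foldl_scl (ps : List Int) : ∀ (acc : List Int) (s : Int),
    (ps.foldl (fun (a : List Int × Int) p => (a.1 ++ [a.2 + p], a.2 + p)) (acc ++ [s], s)).1
      = acc ++ scl s ps := by
  induction ps with
  | nil => intro acc s; simp [scl]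
  | cons p r ih =>
    intro acc s
    have := ih (acc ++ [s]) (s + p)
    simp only [List.foldl_cons]
    simpa [scl, List.append_assoc] using this

lemma scl_getD (ps : List Int) : ∀ (s : Int) (k : Nat), k ≤ ps.length →
    (scl s ps).getD k 0 = s + (ps.take k).sum := by
  induction ps with
  | nil =>
    intro s k hk
    have hk0 : k = 0 := by simpa using hk
    subst hk0; simp [scl]
  | cons p r ih =>
    intro s k hk
    cases k with
    | zero => simp [scl]
    | succ j =>
      have h2 := ih (s + p) j (by simpa using hk)
      simp only [scl, List.getD_cons_succ, List.take_succ_cons, List.sum_cons, h2]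
      ring

lemma all_congr_mem {α : Type} (l : List α) (p q : α → Bool)
    (h : ∀ x ∈ l, p x = q x) : l.all p = l.all q := by
  induction l with
  | nil => rfl
  | cons a t ih =>
    simp only [List.all_cons, h a (by simp)]
    rw [ih (fun x hx => h x (by simp [hx]))]

lemma all_range_eq_g (ps : List Int) : ∀ (m : Int),
    (List.range (ps.length + 1)).all (fun k => decide (m - (k : Int) + (ps.take k).sum > 0))
      = gSurv m ps := by
  induction ps with
  | nil =>
    intro m; simp [gSurv]
  | cons p r ih =>
    intro m
    rw [show (p :: r).length + 1 = (r.length + 1) + 1 from rfl, List.range_succ_eq_map]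
    rw [List.all_cons, List.all_map]
    have hf : ((fun k : Nat => decide (m - (k : Int) + ((p :: r).take k).sum > 0)) ∘ Nat.succ)
        = (fun k : Nat => decide ((m - 1 + p) - (k : Int) + (r.take k).sum > 0)) := by
      funext j
      simp only [Function.comp, List.take_succ_cons, List.sum_cons, decide_eq_decide]
      push_cast
      omega
    rw [hf, ih (m - 1 + p)]
    simp [gSurv]

lemma alt_eq_g (m : Int) (ps : List Int) : survives_alt m ps = gSurv m ps := by
  unfold survives_alt
  have hst := foldl_scl ps [] 0
  simp only [List.nil_append] at hst
  simp only [hst]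
  rw [← all_range_eq_g ps m]
  apply all_congr_mem
  intro k hk
  have hk' : k ≤ ps.length := by
    have := List.mem_range.mp hk; omega
  rw [scl_getD ps 0 k hk']
  simp

-- A-side: the loop's step and stop equations
lemma go_pos (m pos : Int) (ps : List Int) (hm : m > 0) (hp : pos < (ps.length : Int)) :
    survivesGo m pos ps
      = survivesGo (if pos + 1 < (ps.length : Int)
                    then m - 1 + (PySem.List.pyGet? ps (pos + 1)).getD 0
                    else m - 1) (pos + 1) ps := by
  rw [survivesGo, if_pos ⟨hm, hp⟩]

lemma go_stop (m pos : Int) (ps : List Int) (h : ¬ (m > 0 ∧ pos < (ps.length : Int))) :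
    survivesGo m pos ps = pos := by
  rw [survivesGo, if_neg h]

-- A-side: the loop computes gSurv on the remaining suffix
lemma goA (l : List Int) : ∀ (m pos : Int) (ps : List Int),
    -1 ≤ pos → pos < (ps.length : Int) → ps.drop (pos + 1).toNat = l →
    (survivesGo m pos ps = (ps.length : Int) ↔ gSurv m l = true) := by
  induction l with
  | nil =>
    intro m pos ps h1 h2 hdrop
    have hlen : ps.length ≤ (pos + 1).toNat := List.drop_eq_nil_iff.mp hdrop
    have hpos : pos + 1 = (ps.length : Int) := by omega
    by_cases hm : m > 0
    · rw [go_pos m pos ps hm h2, if_neg (by omega),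
          go_stop (m - 1) (pos + 1) ps (by omega)]
      simp [gSurv, hm, hpos]
    · rw [go_stop m pos ps (by omega)]
      simp [gSurv, hm]
      omega
  | cons p rest ih =>
    intro m pos ps h1 h2 hdrop
    have hn : (pos + 1).toNat < ps.length := by
      by_contra h
      rw [List.drop_eq_nil_iff.mpr (by omega)] at hdrop
      simp at hdrop
    have hget : ps[(pos + 1).toNat]? = some p := by
      have h : (List.drop (pos + 1).toNat ps)[0]? = ps[(pos + 1).toNat + 0]? :=
        List.getElem?_drop
      rw [hdrop] at h
      simpa using h.symm
    have hpy : PySem.List.pyGet? ps (pos + 1) = some p := by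
      have hcast : ((pos + 1).toNat : Int) = pos + 1 := by omega
      rw [← hcast, PySem.List.pyGet?_natCast, hget]
    by_cases hm : m > 0
    · rw [go_pos m pos ps hm h2, if_pos (by omega), hpy]
      have hdrop' : ps.drop (pos + 1 + 1).toNat = rest := by
        have he : (pos + 1 + 1).toNat = (pos + 1).toNat + 1 := by omega
        rw [he, ← List.tail_drop, hdrop]
        rfl
      rw [Option.getD_some,
          ih (m - 1 + p) (pos + 1) ps (by omega) (by omega) hdrop']
      simp [gSurv, hm]
    · rw [go_stop m pos ps (by omega)]
      simp [gSurv, hm]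
      omega

lemma a_eq_g (m : Int) (ps : List Int) : survives m ps = gSurv m ps := by
  unfold survives
  rw [Bool.eq_iff_iff, decide_eq_true_iff]
  exact goA ps m (-1) ps (by omega) (by omega) (by simp)

-- ===== VERDICT (by name: the statement is the Claim_ definition above) =====
theorem survives_spec : Claim_equal_survives := by
  intro m ps _
  unfold Spec_survives
  rw [a_eq_g, alt_eq_g]
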